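-- pv_equiv track=rewrite | github.com/cboyd0319/BazBOM | tools/supplychain/sbom_signing.py | _extract_certificate_from_output
-- ===== SOURCE A (Python) =====
-- def _extract_certificate_from_output(output: str) -> str:
--     """Extract signing certificate from cosign output.
--
--     Args:
--         output: cosign command output (stderr)
--
--     Returns:
--         PEM-encoded certificate or empty string if not found
--     """
--     lines = output.split('\n')
--     cert_lines = []
--     in_cert = False
--
--     for line in lines:
--         if "-----BEGIN CERTIFICATE-----" in line:
--             in_cert = True
--         if in_cert:
--             cert_lines.append(line)
--         if "-----END CERTIFICATE-----" in line:
--             in_cert = False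
--             break
--
--     return '\n'.join(cert_lines) if cert_lines else ""
-- ===== SOURCE B (Python) =====
-- def _extract_certificate_from_output(output: str) -> str:
--     lines = output.split('\n')
--     begin = next((k for k, line in enumerate(lines)
--                   if "-----BEGIN CERTIFICATE-----" in line), None)
--     if begin is None:
--         return ""
--     end = next((k for k in range(begin, len(lines))
--                 if "-----END CERTIFICATE-----" in lines[k]), None)
--     block = lines[begin:] if end is None else lines[begin:end + 1]
--     return '\n'.join(block)
-- ===== Notes on version B (the rewrite author's own statement) =====
-- stated objective: simpler
-- what changed: Replaces A's stateful scan (in_cert flag, append-as-you-go, break) by locating the first BEGIN-marker line index and the first END-marker index at or after it, then slicing and joining that block.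
-- intended difference: On outputs where a line containing '-----END CERTIFICATE-----' precedes the first '-----BEGIN CERTIFICATE-----' line, A's break aborts the scan and returns '', while B returns the certificate block actually present, which is the intended value for a certificate extractor. — e.g. on _extract_certificate_from_output("-----END CERTIFICATE-----\n-----BEGIN CERTIFICATE-----\n-----END CERTIFICATE-----"): A returns "", B returns "-----BEGIN CERTIFICATE-----\n-----END CERTIFICATE-----"
import Mathlib
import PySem

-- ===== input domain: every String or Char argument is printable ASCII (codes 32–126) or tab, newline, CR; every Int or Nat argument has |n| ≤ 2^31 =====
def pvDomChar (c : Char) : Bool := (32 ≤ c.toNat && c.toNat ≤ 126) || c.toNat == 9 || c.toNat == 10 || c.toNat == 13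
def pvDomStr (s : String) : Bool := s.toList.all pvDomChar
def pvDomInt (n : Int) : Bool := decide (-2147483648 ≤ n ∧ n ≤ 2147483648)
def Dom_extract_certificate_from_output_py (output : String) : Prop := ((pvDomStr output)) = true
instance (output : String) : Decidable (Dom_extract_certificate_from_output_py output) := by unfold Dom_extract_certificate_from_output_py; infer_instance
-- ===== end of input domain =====

-- B replaces A's stateful scan (in_cert flag + break) by locating the BEGIN and END line
-- indices and slicing; objective: simpler. On outputs with a stray END line before the
-- first BEGIN line the two differ by intent (see D_ below).

-- ===== PORT A =====
def pvBeg : String := "-----BEGIN CERTIFICATE-----"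
def pvEnd : String := "-----END CERTIFICATE-----"
/-- `"-----BEGIN CERTIFICATE-----" in line` -/
def pvHasB (l : String) : Bool := PySem.Str.isIn pvBeg l
/-- `"-----END CERTIFICATE-----" in line` -/
def pvHasE (l : String) : Bool := PySem.Str.isIn pvEnd l

/-- A's `for` loop over `lines` with accumulator `cert_lines` and flag `in_cert`; the
`break` is the early return when the END marker is seen. -/
def pvLoopA : List String → List String → Bool → List String
  | [], acc, _ => acc
  | l :: r, acc, inCert =>
    let inCert := if pvHasB l then true else inCert
    let acc := if inCert then acc ++ [l] else acc
    if pvHasE l then acc else pvLoopA r acc inCert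

def extract_certificate_from_output_py (output : String) : String :=
  let lines := (PySem.Str.split? output "\n").getD []
  let certLines := pvLoopA lines [] false
  if certLines = [] then "" else PySem.Str.join "\n" certLines

-- ===== PORT B =====
def extract_certificate_from_output_py_alt (output : String) : String :=
  let lines := (PySem.Str.split? output "\n").getD []
  match lines.findIdx? (pvHasB) with
  | none => ""
  | some begIdx =>
    -- Source B searches for END at indices `range(begin, len(lines))`; the offset of the
    -- first hit within the suffix `lines[begin:]` is that same search.
    let block :=
      match (lines.drop begIdx).findIdx? (pvHasE) with
      | none => lines.drop begIdx                     -- lines[begin:]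
      | some k => (lines.drop begIdx).take (k + 1)    -- lines[begin:end+1]
    PySem.Str.join "\n" block

-- ===== PRECONDITION & SPEC =====
-- On outputs whose first END-marker line precedes the first BEGIN-marker line, A's break
-- aborts the scan and returns "", while B returns the certificate block that is actually
-- present; B's value is the intended one for the function's purpose.
def D_extract_certificate_from_output_py (output : String) : Prop :=
  (let ls := (PySem.Str.split? output "\n").getD []
   ls.any (PySem.Str.isIn "-----BEGIN CERTIFICATE-----") &&
     (ls.takeWhile (fun l => !PySem.Str.isIn "-----BEGIN CERTIFICATE-----" l)).any
       (PySem.Str.isIn "-----END CERTIFICATE-----")) = true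
instance (output : String) : Decidable (D_extract_certificate_from_output_py output) := by
  unfold D_extract_certificate_from_output_py; infer_instance

def Spec_extract_certificate_from_output_py (output : String) (out : String) : Prop :=
  ¬ D_extract_certificate_from_output_py output → out = extract_certificate_from_output_py_alt output
instance (output : String) (out : String) : Decidable (Spec_extract_certificate_from_output_py output out) := by
  unfold Spec_extract_certificate_from_output_py; infer_instance

def pvDiffWitness_extract_certificate_from_output_py : String :=
  "-----END CERTIFICATE-----\n-----BEGIN CERTIFICATE-----\n-----END CERTIFICATE-----"
def pvDiffWitnessOut_extract_certificate_from_output_py : String × String :=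
  ("", "-----BEGIN CERTIFICATE-----\n-----END CERTIFICATE-----")

-- ===== CLAIM (what is proved, stated in full; the proofs are below) =====
def Claim_unchanged_extract_certificate_from_output_py : Prop := ∀ (output : String), Dom_extract_certificate_from_output_py output → Spec_extract_certificate_from_output_py output (extract_certificate_from_output_py output)
def Claim_changed_extract_certificate_from_output_py : Prop := Dom_extract_certificate_from_output_py (pvDiffWitness_extract_certificate_from_output_py) ∧ D_extract_certificate_from_output_py (pvDiffWitness_extract_certificate_from_output_py) ∧ extract_certificate_from_output_py (pvDiffWitness_extract_certificate_from_output_py) = pvDiffWitnessOut_extract_certificate_from_output_py.1 ∧ extract_certificate_from_output_py_alt (pvDiffWitness_extract_certificate_from_output_py) = pvDiffWitnessOut_extract_certificate_from_output_py.2 ∧ pvDiffWitnessOut_extract_certificate_from_output_py.1 ≠ pvDiffWitnessOut_extract_certificate_from_output_py.2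
def Claim_exact_extract_certificate_from_output_py : Prop := ∀ (output : String), Dom_extract_certificate_from_output_py output → D_extract_certificate_from_output_py output → extract_certificate_from_output_py output ≠ extract_certificate_from_output_py_alt output

-- ===== LEMMAS AND PROOFS =====
/-- The certificate tail: everything up to and including the first END line. -/
def pvTail (r : List String) : List String :=
  match r.findIdx? (pvHasE) with
  | none => r
  | some k => r.take (k + 1)

lemma pvLoopA_true (r : List String) : ∀ acc, pvLoopA r acc true = acc ++ pvTail r := by
  induction r with
  | nil => intro acc; simp [pvLoopA, pvTail]
  | cons l r ih =>
    intro acc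
    have hstep : pvLoopA (l :: r) acc true =
        if pvHasE l then acc ++ [l] else pvLoopA r (acc ++ [l]) true := by
      simp [pvLoopA]
    rw [hstep]
    by_cases hE : pvHasE l
    · simp [hE, pvTail, List.findIdx?_cons]
    · simp only [hE, Bool.false_eq_true, if_false]
      rw [ih]
      unfold pvTail
      rw [List.findIdx?_cons]
      simp only [hE, Bool.false_eq_true, if_false]
      cases h : List.findIdx? pvHasE r <;> simp [h]

/-- The change region, re-read as: the first END line strictly precedes the first BEGIN line. -/
lemma pvD_iff (ls : List String) :
    (ls.any pvHasB && (ls.takeWhile (fun l => !pvHasB l)).any pvHasE) = true ↔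
    (match ls.findIdx? pvHasB, ls.findIdx? pvHasE with
     | some i, some e => decide (e < i)
     | _, _ => false) = true := by
  induction ls with
  | nil => simp
  | cons l r ih =>
    by_cases hB : pvHasB l
    · simp only [List.any_cons, List.takeWhile_cons, List.findIdx?_cons, hB, if_true,
        Bool.not_true, Bool.true_or, Bool.true_and]
      by_cases hE : pvHasE l <;> simp [hE] <;> cases h : r.findIdx? pvHasE <;> simp [h]
    · have hany := @List.findIdx?_isSome _ r pvHasB
      by_cases hE : pvHasE l
      · simp only [List.any_cons, List.takeWhile_cons, List.findIdx?_cons, hB, hE,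
          Bool.false_eq_true, if_false, if_true, Bool.not_false, Bool.false_or, List.any_cons,
          Bool.true_or, Bool.and_true]
        cases h : r.findIdx? pvHasB <;> rw [h] at hany <;> simp at hany <;>
          (try simp [hany]) <;> (try exact hany)
      · simp only [List.any_cons, List.takeWhile_cons, List.findIdx?_cons, hB, hE,
          Bool.false_eq_true, if_false, Bool.not_false, Bool.false_or, if_true,
          List.any_cons] at ih ⊢
        rw [ih]
        cases hF : r.findIdx? pvHasB <;> cases hG : r.findIdx? pvHasE <;> simp

lemma pvLoopA_main (lines : List String)
    (h : match lines.findIdx? (pvHasB),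
               lines.findIdx? (pvHasE) with
         | some i, some e => i ≤ e
         | _, _ => True) :
    pvLoopA lines [] false =
      match lines.findIdx? (pvHasB) with
      | none => []
      | some i => pvTail (lines.drop i) := by
  induction lines with
  | nil => simp [pvLoopA]
  | cons l r ih =>
    by_cases hB : pvHasB l
    · have : pvLoopA (l :: r) [] false = pvLoopA (l :: r) [] true := by
        simp [pvLoopA, hB]
      rw [this, pvLoopA_true]
      simp [List.findIdx?_cons, hB, pvTail]
    · by_cases hE : pvHasE l
      · -- A breaks immediately with acc = []
        simp only [List.findIdx?_cons, hB, hE, if_true, if_false] at h ⊢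
        cases hF : r.findIdx? (pvHasB) with
        | none => simp [pvLoopA, hB, hE, hF]
        | some i => rw [hF] at h; simp at h
      · simp only [List.findIdx?_cons, hB, hE, if_false] at h ⊢
        have step : pvLoopA (l :: r) [] false = pvLoopA r [] false := by
          simp [pvLoopA, hB, hE]
        rw [step]
        cases hF : r.findIdx? (pvHasB) with
        | none =>
          rw [hF] at h
          have := ih (by cases hG : r.findIdx? (pvHasE) <;> simp [hF, hG])
          rw [hF] at this; simpa using this
        | some i =>
          rw [hF] at h
          cases hG : r.findIdx? (pvHasE) with
          | none =>
            have := ih (by simp [hF, hG])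
            rw [hF] at this; simpa using this
          | some e =>
            rw [hG] at h; simp at h
            have := ih (by simp [hF, hG]; omega)
            rw [hF] at this; simpa using this

lemma pvLoopA_nil_of_D (lines : List String) (i e : Nat)
    (hB : lines.findIdx? (pvHasB) = some i)
    (hE : lines.findIdx? (pvHasE) = some e)
    (hlt : e < i) : pvLoopA lines [] false = [] := by
  induction lines generalizing i e with
  | nil => simp [pvLoopA]
  | cons l r ih =>
    simp only [List.findIdx?_cons] at hB hE
    by_cases hb : pvHasB l
    · simp [hb] at hB; omega
    · simp only [hb, if_false, Bool.false_eq_true] at hB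
      by_cases he : pvHasE l
      · simp [pvLoopA, hb, he]
      · simp only [he, if_false, Bool.false_eq_true] at hE
        cases hB' : r.findIdx? (pvHasB) with
        | none => simp [hB'] at hB
        | some i' =>
          cases hE' : r.findIdx? (pvHasE) with
          | none => simp [hE'] at hE
          | some e' =>
            simp [hB', hE'] at hB hE
            have step : pvLoopA (l :: r) [] false = pvLoopA r [] false := by
              simp [pvLoopA, hb, he]
            rw [step]; exact ih i' e' hB' hE' (by omega)

-- ===== VERDICT (by name: the statement is the Claim_ definition above) =====
theorem extract_certificate_from_output_py_spec : Claim_unchanged_extract_certificate_from_output_py := by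
  intro output _ hD0
  have hD : ¬ (match ((PySem.Str.split? output "\n").getD []).findIdx? pvHasB,
                     ((PySem.Str.split? output "\n").getD []).findIdx? pvHasE with
               | some i, some e => decide (e < i)
               | _, _ => false) = true :=
    fun hc => hD0 ((pvD_iff ((PySem.Str.split? output "\n").getD [])).mpr hc)
  clear hD0
  simp only [extract_certificate_from_output_py, extract_certificate_from_output_py_alt]
  set lines := (PySem.Str.split? output "\n").getD [] with hl
  have hcond : match lines.findIdx? (pvHasB),
                     lines.findIdx? (pvHasE) with
               | some i, some e => i ≤ e
               | _, _ => True := by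
    cases hF : lines.findIdx? (pvHasB) with
    | none => simp
    | some i =>
      cases hG : lines.findIdx? (pvHasE) with
      | none => simp
      | some e => rw [hF, hG] at hD; simp at hD; simp; omega
  have hmain := pvLoopA_main lines hcond
  cases hF : lines.findIdx? (pvHasB) with
  | none => rw [hF] at hmain; simp [hmain]
  | some i =>
    rw [hF] at hmain
    have hi : i < lines.length := (List.findIdx?_eq_some_iff_findIdx_eq.mp hF).1
    have hne : pvTail (lines.drop i) ≠ [] := by
      have hd : lines.drop i ≠ [] := by
        intro hc; have := List.drop_eq_nil_iff.mp hc; omega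
      unfold pvTail
      cases hG : (lines.drop i).findIdx? (pvHasE) with
      | none => simpa using hd
      | some k => simp [hd]
    rw [hmain]
    simp only [hne, if_false]
    unfold pvTail
    cases hG : (lines.drop i).findIdx? (pvHasE) <;> simp [hG]

theorem extract_certificate_from_output_py_changed : Claim_changed_extract_certificate_from_output_py := by
  unfold Claim_changed_extract_certificate_from_output_py; decide

lemma pvJoin_ne {x : String} {t : List String} (hx : x.toList ≠ [])
    (h : PySem.Str.join "\n" (x :: t) = "") : False := by
  have hl := congrArg String.toList h
  rw [PySem.Str.toList_join] at hl
  cases t with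
  | nil => rw [List.map_cons, List.map_nil, PySem.Chars.join_singleton] at hl; exact hx (by simpa using hl)
  | cons y t =>
    rw [List.map_cons, List.map_cons, PySem.Chars.join_cons_cons] at hl
    rw [List.append_assoc] at hl
    rw [show ("" : String).toList = [] from rfl, List.append_eq_nil_iff] at hl
    exact hx hl.1

theorem extract_certificate_from_output_py_tight : Claim_exact_extract_certificate_from_output_py := by
  intro output _ hD0
  have hD : (match ((PySem.Str.split? output "\n").getD []).findIdx? pvHasB,
                   ((PySem.Str.split? output "\n").getD []).findIdx? pvHasE with
             | some i, some e => decide (e < i)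
             | _, _ => false) = true :=
    (pvD_iff ((PySem.Str.split? output "\n").getD [])).mp hD0
  clear hD0
  simp only [extract_certificate_from_output_py, extract_certificate_from_output_py_alt]
  set lines := (PySem.Str.split? output "\n").getD [] with hl
  cases hF : lines.findIdx? (pvHasB) with
  | none => rw [hF] at hD; simp at hD
  | some i =>
    cases hG : lines.findIdx? (pvHasE) with
    | none => rw [hF, hG] at hD; simp at hD
    | some e =>
      rw [hF, hG] at hD; simp at hD
      have hA : pvLoopA lines [] false = [] := pvLoopA_nil_of_D lines i e hF hG hD
      rw [hA]
      simp only [if_true, eq_self_iff_true, hF]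
      -- B's block starts with the BEGIN line, a nonempty string, so the join is nonempty
      obtain ⟨hi, hp, -⟩ := List.findIdx?_eq_some_iff_getElem.mp hF
      have hd : lines.drop i = lines[i] :: lines.drop (i + 1) :=
        (List.drop_eq_getElem_cons hi)
      have hx : lines[i].toList ≠ [] := by
        intro hnil
        have hin := (PySem.Chars.isIn_iff_infix pvBeg.toList lines[i].toList).mp
          (by simpa [pvHasB, PySem.Str.isIn_eq] using hp)
        rw [hnil] at hin
        exact by simpa [pvBeg] using List.eq_nil_of_infix_nil hin
      cases hGi : (lines.drop i).findIdx? pvHasE with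
      | none => simp only [hGi]; rw [hd]; exact fun h => pvJoin_ne hx (h.symm)
      | some k =>
        simp only [hGi]; rw [hd]
        exact fun h => pvJoin_ne hx (h.symm)
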